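-- pv_equiv track=rewrite | github.com/bozakp/tab-monitor | to_json.py | line_sets
-- ===== SOURCE A (Python) =====
-- def line_sets(lines):
--     start = 0
--     while start < len(lines):
--         stop = start+1
--         while stop < len(lines) and lines[stop][0] != "=":
--             stop += 1
--         yield lines[start:stop]
--         start = stop
-- ===== SOURCE B (Python) =====
-- def line_sets(lines):
--     group = []
--     for line in lines:
--         if group and line.startswith("="):
--             yield group
--             group = []
--         group.append(line)
--     if group:
--         yield group
-- ===== Notes on version B (the rewrite author's own statement) =====
-- stated objective: simpler
-- what changed: Replaces A's index-based double while loop (inner scan for the next '='-delimiter, then a slice) with a single pass that accumulates the current group and yields it whenever a new '='-line starts a group; startswith makes A's IndexError on empty lines disappear.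
import Mathlib
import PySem

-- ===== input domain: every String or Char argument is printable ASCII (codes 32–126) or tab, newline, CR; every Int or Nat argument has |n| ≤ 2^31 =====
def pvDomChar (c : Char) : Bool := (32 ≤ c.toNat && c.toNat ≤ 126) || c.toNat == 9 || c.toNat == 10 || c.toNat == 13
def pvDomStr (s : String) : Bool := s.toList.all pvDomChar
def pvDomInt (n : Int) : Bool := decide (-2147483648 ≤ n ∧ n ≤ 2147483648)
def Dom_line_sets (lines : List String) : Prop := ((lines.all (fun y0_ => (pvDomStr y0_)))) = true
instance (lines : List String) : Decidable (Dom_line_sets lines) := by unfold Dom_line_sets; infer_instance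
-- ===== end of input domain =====

-- B replaces A's index-based double while loop with a single accumulating pass; return-value equivalence (A is a generator, compared as a list).

-- ===== PORT A =====
-- inner while loop: advance stop while stop < len(lines) and lines[stop][0] != "="
def lineSetsFindStop (lines : List String) (stop : Nat) : Nat :=
  if h : stop < lines.length then
    if PySem.Str.pyGet? (lines.getD stop "") 0 ≠ some '=' then
      lineSetsFindStop lines (stop + 1)
    else stop
  else stop
termination_by lines.length - stop
decreasing_by omega

theorem lineSetsFindStop_le (lines : List String) (s : Nat) : s ≤ lineSetsFindStop lines s := by
  fun_induction lineSetsFindStop lines s with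
  | case1 _ _ _ ih => omega
  | case2 => omega
  | case3 => omega

-- outer while loop over start
def lineSetsLoop (lines : List String) (start : Nat) : List (List String) :=
  if h : start < lines.length then
    let stop := lineSetsFindStop lines (start + 1)
    PySem.List.slice lines (some (start : Int)) (some (stop : Int)) :: lineSetsLoop lines stop
  else []
termination_by lines.length - start
decreasing_by
  have := lineSetsFindStop_le lines (start + 1)
  omega

def line_sets (lines : List String) : List (List String) := lineSetsLoop lines 0

-- ===== PORT B =====
def lineSetsAltGo (rest : List String) (group : List String) : List (List String) :=
  match rest with
  | [] => if group = [] then [] else [group]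
  | l :: ls =>
    if group ≠ [] ∧ PySem.Str.startswith l "=" then
      group :: lineSetsAltGo ls [l]
    else
      lineSetsAltGo ls (group ++ [l])

def line_sets_alt (lines : List String) : List (List String) := lineSetsAltGo lines []

-- ===== PRECONDITION & SPEC =====
-- Pre_ excludes exactly the inputs on which A raises IndexError: some line after the first is "".
def Pre_line_sets (lines : List String) : Prop := ∀ l ∈ lines.drop 1, l ≠ ""
instance (lines : List String) : Decidable (Pre_line_sets lines) := by unfold Pre_line_sets; infer_instance
def pvWitness_line_sets : List String := ["=a", "b", "=c"]

def Spec_line_sets (lines : List String) (out : List (List String)) : Prop := out = line_sets_alt lines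
instance (lines : List String) (out : List (List String)) : Decidable (Spec_line_sets lines out) := by unfold Spec_line_sets; infer_instance

-- ===== CLAIM (what is proved, stated in full; the proofs are below) =====
def Claim_equal_line_sets : Prop := ∀ (lines : List String), Dom_line_sets lines → Pre_line_sets lines → Spec_line_sets lines (line_sets lines)

-- ===== LEMMAS AND PROOFS =====

-- "this line does not start a new group"
def ndl (l : String) : Bool := ! PySem.Str.startswith l "="

-- the common split-into-groups function both ports compute
def groupsOf : List String → List (List String)
  | [] => []
  | l :: ls => (l :: ls.takeWhile ndl) :: groupsOf (ls.dropWhile ndl)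
termination_by l => l.length
decreasing_by
  have := List.length_dropWhile_le (p := ndl) (l := ls)
  simpa using Nat.lt_succ_of_le this

theorem take_length_takeWhile {α : Type} (p : α → Bool) (l : List α) :
    l.take (l.takeWhile p).length = l.takeWhile p := by
  induction l with
  | nil => simp
  | cons x xs ih =>
    by_cases h : p x <;> simp [List.takeWhile_cons, h, ih]

theorem drop_length_takeWhile {α : Type} (p : α → Bool) (l : List α) :
    l.drop (l.takeWhile p).length = l.dropWhile p := by
  induction l with
  | nil => simp
  | cons x xs ih =>
    by_cases h : p x <;> simp [List.takeWhile_cons, List.dropWhile_cons, h, ih]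

-- bridge between A's test lines[stop][0] != "=" and B's startswith, for nonempty strings
theorem charsStartswith_single (c d : Char) (cs : List Char) :
    PySem.Chars.startswith (c :: cs) [d] = (c == d) := by
  by_cases hcd : c = d
  · subst hcd
    exact (PySem.Chars.startswith_iff _ _).mpr ⟨cs, rfl⟩ |>.trans (by simp)
  · have : ¬ PySem.Chars.startswith (c :: cs) [d] = true := by
      intro hsw
      obtain ⟨t, ht⟩ := (PySem.Chars.startswith_iff _ _).mp hsw
      injection ht with h1 _
      exact hcd h1.symm
    simp at this
    simp [this, hcd]

theorem toList_ne_nil (s : String) (h : s ≠ "") : s.toList ≠ [] := by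
  intro he
  apply h
  have := congrArg String.ofList he
  simpa using this

theorem test_bridge (l : String) (h : l.toList ≠ []) :
    (PySem.Str.pyGet? l 0 ≠ some '=') ↔ ndl l = true := by
  obtain ⟨c, cs, hc⟩ : ∃ c cs, l.toList = c :: cs := by
    cases hx : l.toList with
    | nil => exact absurd hx h
    | cons a as => exact ⟨a, as, rfl⟩
  have h1 : PySem.Str.pyGet? l 0 = some c := by
    rw [show (0 : Int) = ((0 : Nat) : Int) from rfl, PySem.Str.pyGet?_natCast]
    simp [hc]
  have h2 : PySem.Str.startswith l "=" = (c == '=') := by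
    rw [PySem.Str.startswith_eq, show ("=" : String).toList = ['='] from rfl, hc]
    exact charsStartswith_single c '=' cs
  unfold ndl
  rw [h1, h2]
  by_cases hce : c = '=' <;> simp [hce]

theorem findStop_eq (lines : List String) (s : Nat)
    (hne : ∀ l ∈ lines.drop s, l ≠ "") :
    lineSetsFindStop lines s = s + ((lines.drop s).takeWhile ndl).length := by
  fun_induction lineSetsFindStop lines s with
  | case1 s h hc ih =>
    have hd : lines.drop s = lines[s] :: lines.drop (s + 1) := List.drop_eq_getElem_cons h
    have hgd : lines.getD s "" = lines[s] := List.getD_eq_getElem lines "" h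
    have hmem : lines[s] ∈ lines.drop s := by rw [hd]; exact List.mem_cons_self
    have hne' : lines[s] ≠ "" := hne _ hmem
    have hndl : ndl lines[s] = true := (test_bridge _ (toList_ne_nil _ hne')).mp (by rwa [hgd] at hc)
    rw [ih (fun l hl => hne l (by rw [hd]; exact List.mem_cons_of_mem _ hl))]
    rw [hd, List.takeWhile_cons, hndl]
    simp; omega
  | case2 s h hc =>
    have hd : lines.drop s = lines[s] :: lines.drop (s + 1) := List.drop_eq_getElem_cons h
    have hgd : lines.getD s "" = lines[s] := List.getD_eq_getElem lines "" h
    have hne' : lines[s] ≠ "" := hne _ (by rw [hd]; exact List.mem_cons_self)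
    rw [hgd] at hc
    have hndl : ¬ ndl lines[s] = true := by
      intro hn
      exact hc ((test_bridge _ (toList_ne_nil _ hne')).mpr hn) |>.elim
    have : ndl lines[s] = false := by simpa using hndl
    rw [hd, List.takeWhile_cons, this]
    simp
  | case3 s h =>
    have : lines.drop s = [] := List.drop_eq_nil_of_le (by omega)
    simp [this]

theorem loop_eq (lines : List String) (start : Nat)
    (hne : ∀ l ∈ lines.drop (start + 1), l ≠ "") :
    lineSetsLoop lines start = groupsOf (lines.drop start) := by
  fun_induction lineSetsLoop lines start with
  | case1 start h stop ih =>
    have hstop : stop = (start + 1) + ((lines.drop (start + 1)).takeWhile ndl).length :=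
      findStop_eq lines (start + 1) hne
    have hd : lines.drop start = lines[start] :: lines.drop (start + 1) :=
      List.drop_eq_getElem_cons h
    have hslice : PySem.List.slice lines (some (start : Int)) (some (stop : Int)) =
        (lines.drop start).take (stop - start) := PySem.List.slice_natCast lines start stop
    have htake : (lines.drop start).take (stop - start) =
        lines[start] :: (lines.drop (start + 1)).takeWhile ndl := by
      rw [hd, hstop]
      have : start + 1 + ((lines.drop (start + 1)).takeWhile ndl).length - start
          = ((lines.drop (start + 1)).takeWhile ndl).length + 1 := by omega
      rw [this, List.take_succ_cons, take_length_takeWhile]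
    have hdropstop : lines.drop stop = (lines.drop (start + 1)).dropWhile ndl := by
      rw [← drop_length_takeWhile ndl (lines.drop (start + 1)), List.drop_drop, hstop]
    have hne' : ∀ l ∈ lines.drop (stop + 1), l ≠ "" := by
      intro l hl
      apply hne
      have h1 : lines.drop (stop + 1) = (lines.drop (start + 1)).drop (stop - start) := by
        rw [List.drop_drop]
        congr 1
        have := lineSetsFindStop_le lines (start + 1)
        omega
      rw [h1] at hl
      exact List.drop_subset _ _ hl
    rw [ih hne', hslice, htake, hdropstop, hd]
    rw [groupsOf]
  | case2 start h =>
    have : lines.drop start = [] := List.drop_eq_nil_of_le (by omega)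
    simp [this, groupsOf]

theorem altGo_eq (rest : List String) (group : List String) (h : group ≠ []) :
    lineSetsAltGo rest group =
      (group ++ rest.takeWhile ndl) :: groupsOf (rest.dropWhile ndl) := by
  induction rest generalizing group with
  | nil => simp [lineSetsAltGo, h, groupsOf]
  | cons l ls ih =>
    cases hs : PySem.Chars.startswith l.toList ['='] with
    | true =>
      have hsS : PySem.Str.startswith l "=" = true := by simpa using hs
      have hnd : ndl l = false := by simp [ndl, hs]
      rw [lineSetsAltGo, if_pos ⟨h, hsS⟩, ih [l] (by simp)]
      simp [List.takeWhile_cons, List.dropWhile_cons, hnd, groupsOf]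
    | false =>
      have hnd : ndl l = true := by simp [ndl, hs]
      rw [lineSetsAltGo, if_neg (by simp [hs]), ih (group ++ [l]) (by simp)]
      simp [List.takeWhile_cons, List.dropWhile_cons, hnd]

theorem alt_eq_groupsOf (lines : List String) : line_sets_alt lines = groupsOf lines := by
  cases lines with
  | nil => simp [line_sets_alt, lineSetsAltGo, groupsOf]
  | cons l ls =>
    rw [line_sets_alt, lineSetsAltGo, if_neg (by simp)]
    rw [show ([] ++ [l] : List String) = [l] from rfl, altGo_eq ls [l] (by simp)]
    simp [groupsOf]

-- ===== VERDICT (by name: the statement is the Claim_ definition above) =====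
theorem line_sets_spec : Claim_equal_line_sets := by
  intro lines _ hpre
  unfold Spec_line_sets line_sets
  rw [loop_eq lines 0 (fun l hl => hpre l (by simpa using hl)), alt_eq_groupsOf]
  simp
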